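-- pv_equiv track=rewrite | github.com/groverdivas/Transition_based_Dependency_Parser | TransitionDependencyParser.py | only_tag
-- ===== SOURCE A (Python) =====
-- from collections import defaultdict
--
-- def only_tag (train):
--
--     ke = []
--     for g in train:
--         t = defaultdict(list)
--         for j in g:
--             if j[2] in t:
--                 t[j[2]].extend([j[0],j[3]])
--                 ##j[0] = related_to_no, j[3] = serial_no
--                 # t[j[2]].extend(j[3])
--             else:
--                 t[j[2]] = [j[0],j[3]]
--                 ##j[0] = related_to_no, j[3] = serial_no
--         ke.append(dict(t))
--
--     return ke
-- ===== SOURCE B (Python) =====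
-- def only_tag(train):
--     # Per sentence: dedup the keys in first-occurrence order, then build each
--     # group's value list with one comprehension scan per key (no dict aggregation).
--     return [
--         {k: [x for j in g if j[2] == k for x in (j[0], j[3])]
--          for k in dict.fromkeys(j[2] for j in g)}
--         for g in train
--     ]
-- ===== Notes on version B (the rewrite author's own statement) =====
-- stated objective: alternative
-- what changed: Replaces the defaultdict single-pass aggregation with dedup-keys-then-one-comprehension-scan-per-key: keys are deduplicated in first-occurrence order via dict.fromkeys and each group's value list is built by filtering the sentence, no mutable dict accumulation.
import Mathlib
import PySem

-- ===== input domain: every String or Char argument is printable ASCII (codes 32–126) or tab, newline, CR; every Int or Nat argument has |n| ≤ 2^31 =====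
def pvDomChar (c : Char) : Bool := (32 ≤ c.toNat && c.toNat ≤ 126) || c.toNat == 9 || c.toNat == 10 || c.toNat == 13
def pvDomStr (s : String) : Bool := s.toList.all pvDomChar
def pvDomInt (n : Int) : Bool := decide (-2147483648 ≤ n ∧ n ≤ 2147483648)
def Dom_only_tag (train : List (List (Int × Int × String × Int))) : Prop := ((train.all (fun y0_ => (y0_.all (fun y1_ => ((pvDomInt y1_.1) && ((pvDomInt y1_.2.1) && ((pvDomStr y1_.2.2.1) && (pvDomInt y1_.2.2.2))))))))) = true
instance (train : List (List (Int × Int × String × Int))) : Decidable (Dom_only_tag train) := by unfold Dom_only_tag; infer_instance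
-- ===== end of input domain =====

-- B replaces A's defaultdict one-pass aggregation by dedup-keys-then-scan-per-key (alternative decomposition, same results).

-- ===== PORT A =====
-- the body of A's inner loop: defaultdict aggregation keyed on j[2]
def onlyTagStep (t : PySem.Dict String (List Int)) (j : Int × Int × String × Int) :
    PySem.Dict String (List Int) :=
  if t.contains j.2.2.1 then
    -- t[j[2]].extend([j[0], j[3]])
    t.modify j.2.2.1 [] (fun v => v ++ [j.1, j.2.2.2])
  else
    -- t[j[2]] = [j[0], j[3]]
    t.insert j.2.2.1 [j.1, j.2.2.2]

def only_tag (train : List (List (Int × Int × String × Int))) : List (List (String × List Int)) :=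
  train.foldl (fun ke g => ke ++ [(g.foldl onlyTagStep PySem.Dict.empty).items]) []

-- ===== PORT B =====
-- value list of the group for key k: [x for j in g if j[2] == k for x in (j[0], j[3])]
def onlyTagVals (g : List (Int × Int × String × Int)) (k : String) : List Int :=
  g.flatMap (fun j => if j.2.2.1 == k then [j.1, j.2.2.2] else [])

def onlyTagSentenceB (g : List (Int × Int × String × Int)) : List (String × List Int) :=
  (PySem.List.dedup (g.map (fun j => j.2.2.1))).map (fun k => (k, onlyTagVals g k))

def only_tag_alt (train : List (List (Int × Int × String × Int))) : List (List (String × List Int)) :=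
  train.map onlyTagSentenceB

-- ===== PRECONDITION & SPEC =====
def Spec_only_tag (train : List (List (Int × Int × String × Int))) (out : List (List (String × List Int))) : Prop := out = only_tag_alt train
instance (train : List (List (Int × Int × String × Int))) (out : List (List (String × List Int))) : Decidable (Spec_only_tag train out) := by unfold Spec_only_tag; infer_instance

-- ===== CLAIM (what is proved, stated in full; the proofs are below) =====
def Claim_equal_only_tag : Prop := ∀ (train : List (List (Int × Int × String × Int))), Dom_only_tag train → Spec_only_tag train (only_tag train)

-- ===== LEMMAS AND PROOFS =====

-- get? on a dict whose items are keys mapped through a value function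
lemma get?_mk_map (K : List String) (V : String → List Int) (c : String) (h : c ∈ K) :
    (PySem.Dict.mk (K.map (fun k => (k, V k)))).get? c = some (V c) := by
  induction K with
  | nil => cases h
  | cons a K ih =>
    simp only [List.map_cons, PySem.Dict.get?_mk_cons]
    by_cases hac : a = c
    · simp [hac]
    · have hc : c ∈ K := by
        rcases List.mem_cons.mp h with h' | h'
        · exact absurd h'.symm hac
        · exact h'
      simp [hac, ih hc]

lemma contains_mk_map (K : List String) (V : String → List Int) (c : String) :
    (PySem.Dict.mk (K.map (fun k => (k, V k)))).contains c = decide (c ∈ K) := by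
  simp only [PySem.Dict.contains, List.any_map]
  by_cases h : c ∈ K
  · simp only [h, decide_true, List.any_eq_true]
    exact ⟨c, h, by simp⟩
  · simp only [h, decide_false, List.any_eq_false]
    intro x hx
    simp only [Function.comp_apply]
    exact fun hxc => h ((eq_of_beq hxc) ▸ hx)

-- A's loop step on a dict in B's "keys mapped through values" form: key already present
lemma step_mem (K : List String) (V : String → List Int) (j : Int × Int × String × Int)
    (hmem : j.2.2.1 ∈ K) :
    onlyTagStep (PySem.Dict.mk (K.map (fun k => (k, V k)))) j =
      PySem.Dict.mk (K.map (fun k =>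
        (k, V k ++ (if j.2.2.1 == k then [j.1, j.2.2.2] else [])))) := by
  have hcont : (PySem.Dict.mk (K.map (fun k => (k, V k)))).contains j.2.2.1 = true := by
    rw [contains_mk_map]; simp [hmem]
  unfold onlyTagStep
  rw [if_pos hcont]
  simp only [PySem.Dict.modify, PySem.Dict.getD, get?_mk_map K V _ hmem, Option.getD_some,
    PySem.Dict.insert, hcont, ite_true]
  congr 1
  rw [List.map_map]
  apply List.map_congr_left
  intro k _
  by_cases hkc : k = j.2.2.1
  · subst hkc; simp
  · have hck : ¬ j.2.2.1 = k := fun h => hkc h.symm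
    simp [hkc, hck]

-- A's loop step on a dict in B's form: new key, appended at the end
lemma step_not_mem (K : List String) (V : String → List Int) (j : Int × Int × String × Int)
    (hmem : j.2.2.1 ∉ K) (hnil : V j.2.2.1 = []) :
    onlyTagStep (PySem.Dict.mk (K.map (fun k => (k, V k)))) j =
      PySem.Dict.mk ((K.map (fun k =>
          (k, V k ++ (if j.2.2.1 == k then [j.1, j.2.2.2] else []))))
        ++ [(j.2.2.1, V j.2.2.1 ++ [j.1, j.2.2.2])]) := by
  have hcont : (PySem.Dict.mk (K.map (fun k => (k, V k)))).contains j.2.2.1 = false := by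
    rw [contains_mk_map]; simp [hmem]
  unfold onlyTagStep
  rw [if_neg (by simp [hcont])]
  simp only [PySem.Dict.insert, hcont, Bool.false_eq_true, if_false]
  congr 1
  rw [hnil, List.nil_append]
  congr 1
  apply List.map_congr_left
  intro k hk
  have hck : ¬ j.2.2.1 = k := fun h => hmem (h ▸ hk)
  simp [hck]

-- a key absent from the dedup of g's keys yields an empty value list
lemma vals_eq_nil_of_not_mem (g : List (Int × Int × String × Int)) (c : String)
    (h : c ∉ PySem.List.dedup (g.map (fun j => j.2.2.1))) : onlyTagVals g c = [] := by
  rw [PySem.List.mem_dedup] at h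
  unfold onlyTagVals
  induction g with
  | nil => rfl
  | cons j g ih =>
    simp only [List.map_cons, List.mem_cons, not_or] at h
    simp only [List.flatMap_cons, ih h.2, List.append_nil]
    have : ¬ j.2.2.1 = c := fun hh => h.1 hh.symm
    simp [this]

-- the dict built by A's inner loop, characterised as B's sentence value
lemma foldl_step_eq (g : List (Int × Int × String × Int)) :
    g.foldl onlyTagStep PySem.Dict.empty =
      PySem.Dict.mk ((PySem.List.dedup (g.map (fun j => j.2.2.1))).map
        (fun k => (k, onlyTagVals g k))) := by
  induction g using List.reverseRecOn with
  | nil => rfl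
  | append_singleton p j ih =>
    rw [List.foldl_append, ih]
    simp only [List.foldl_cons, List.foldl_nil]
    have hded : PySem.List.dedup ((p ++ [j]).map (fun j => j.2.2.1)) =
        PySem.Set.add (PySem.List.dedup (p.map (fun j => j.2.2.1))) j.2.2.1 := by
      simp [PySem.List.dedup, PySem.Set.ofList, List.foldl_append]
    have hvals : ∀ k, onlyTagVals (p ++ [j]) k =
        onlyTagVals p k ++ (if j.2.2.1 == k then [j.1, j.2.2.2] else []) := by
      intro k; simp [onlyTagVals]
    rw [hded]
    by_cases hmem : j.2.2.1 ∈ PySem.List.dedup (p.map (fun j => j.2.2.1))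
    · have hc : PySem.Set.contains (PySem.List.dedup (p.map (fun j => j.2.2.1))) j.2.2.1 = true := by
        simp only [PySem.Set.contains]
        exact List.contains_iff_mem.mpr hmem
      have haddK : PySem.Set.add (PySem.List.dedup (p.map (fun j => j.2.2.1))) j.2.2.1 =
          PySem.List.dedup (p.map (fun j => j.2.2.1)) := by
        show (if _ = true then _ else _) = _
        rw [hc]
        simp
      rw [haddK, step_mem _ _ _ hmem]
      congr 1
      exact (List.map_congr_left (fun k _ => by rw [hvals k])).symm
    · have hc : PySem.Set.contains (PySem.List.dedup (p.map (fun j => j.2.2.1))) j.2.2.1 = false := by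
        simp only [PySem.Set.contains]
        cases hcc : List.contains (PySem.List.dedup (p.map (fun j => j.2.2.1))) j.2.2.1 with
        | false => rfl
        | true => exact absurd (List.contains_iff_mem.mp hcc) hmem
      have haddK : PySem.Set.add (PySem.List.dedup (p.map (fun j => j.2.2.1))) j.2.2.1 =
          PySem.List.dedup (p.map (fun j => j.2.2.1)) ++ [j.2.2.1] := by
        show (if _ = true then _ else _) = _
        rw [hc]
        simp
      rw [haddK, step_not_mem _ _ _ hmem (vals_eq_nil_of_not_mem p _ hmem)]
      congr 1
      rw [List.map_append]
      congr 1
      · exact (List.map_congr_left (fun k _ => by rw [hvals k])).symm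
      · simp [hvals j.2.2.1]

lemma sentence_eq (g : List (Int × Int × String × Int)) :
    (g.foldl onlyTagStep PySem.Dict.empty).items = onlyTagSentenceB g := by
  rw [foldl_step_eq]; rfl

-- ===== VERDICT (by name: the statement is the Claim_ definition above) =====
theorem only_tag_spec : Claim_equal_only_tag := by
  intro train _
  unfold Spec_only_tag only_tag only_tag_alt
  rw [PySem.List.foldl_append_singleton_eq_map]
  exact List.map_congr_left (fun g _ => sentence_eq g)
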